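-- pv_equiv track=rewrite | github.com/JinShuo0510/insect_AS_analyze | jupyter_scripts/exon_extraction/scripts.py | partition_aligned_sequence_with_coords
-- ===== SOURCE A (Python) =====
-- def partition_aligned_sequence_with_coords(aligned_seq, exon_lengths):
--     """
--     根据原始 exon 长度（exon_lengths 列表），遍历包含 gap 的比对序列，
--     按累计非 gap 字符数将比对序列分段，返回两个列表：
--       - segments：每个 exon 对应的比对序列片段（包含 gap）
--       - seg_coords：每个片段在对齐序列中的起始和结束坐标（1-based），即 (start, end)
--     """
--     segments = []
--     seg_coords = []
--     # 预先计算每个 exon 的累计目标值，例如 [L1, L1+L2, L1+L2+L3, ...]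
--     cumulative_targets = []
--     cum = 0
--     for length in exon_lengths:
--         cum += length
--         cumulative_targets.append(cum)
--     raw_count = 0      # 累计非 gap 字符数（跨所有 exon）
--     current_segment = []
--     seg_start = None   # 当前片段在对齐序列中的起始位置（1-based）
--     exon_index = 0     # 当前正在处理第几个 exon（从 0 开始）
--     for i, char in enumerate(aligned_seq, start=1):
--         if seg_start is None:
--             seg_start = i
--         current_segment.append(char)
--         if char != '-':
--             raw_count += 1
--         # 判断是否达到当前 exon 的累计目标
--         if exon_index < len(cumulative_targets) and raw_count == cumulative_targets[exon_index]:
--             seg_end = i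
--             segments.append("".join(current_segment))
--             seg_coords.append((seg_start, seg_end))
--             # 准备下一个 exon
--             current_segment = []
--             seg_start = None
--             exon_index += 1
--     return segments, seg_coords
-- ===== SOURCE B (Python) =====
-- def partition_aligned_sequence_with_coords(aligned_seq, exon_lengths):
--     """Index-then-slice: record the 1-based alignment position of every
--     non-gap character once, then for each cumulative exon target jump
--     straight to its end coordinate and slice the segment out."""
--     positions = [i for i, c in enumerate(aligned_seq, start=1) if c != '-']
--     segments = []
--     seg_coords = []
--     t = 0
--     prev_end = 0
--     for length in exon_lengths:
--         t += length
--         if t > len(positions):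
--             break
--         end = positions[t - 1]
--         segments.append(aligned_seq[prev_end:end])
--         seg_coords.append((prev_end + 1, end))
--         prev_end = end
--     return segments, seg_coords
-- ===== Notes on version B (the rewrite author's own statement) =====
-- stated objective: alternative
-- what changed: Replaces A's character-by-character scan (per-char segment buffer, seg_start, raw counter, exon index, join per exon) by a one-shot index of the 1-based non-gap positions plus a loop over the exon lengths that jumps directly to each cumulative target's end coordinate and slices the segment out; …
-- outside the precondition, e.g. on partition_aligned_sequence_with_coords('AB', [0, 1]): A returns ([], []), B returns (['AB', ''], [(1, 2), (3, 1)])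
import Mathlib
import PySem

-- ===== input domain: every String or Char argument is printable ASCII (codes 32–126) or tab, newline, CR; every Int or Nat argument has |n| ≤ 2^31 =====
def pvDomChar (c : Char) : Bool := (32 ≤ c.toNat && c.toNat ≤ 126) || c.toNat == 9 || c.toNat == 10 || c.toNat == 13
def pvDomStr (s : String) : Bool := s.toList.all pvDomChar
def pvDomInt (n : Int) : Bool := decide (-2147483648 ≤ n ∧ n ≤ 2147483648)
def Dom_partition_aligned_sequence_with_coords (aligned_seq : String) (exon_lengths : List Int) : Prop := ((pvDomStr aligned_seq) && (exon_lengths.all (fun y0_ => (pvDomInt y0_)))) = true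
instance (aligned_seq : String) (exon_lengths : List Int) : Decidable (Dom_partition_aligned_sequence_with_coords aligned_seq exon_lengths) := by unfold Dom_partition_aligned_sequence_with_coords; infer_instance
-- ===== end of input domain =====

-- B replaces A's char-by-char scan by an index of non-gap positions plus direct
-- slicing per cumulative exon target (alternative decomposition, same values on Pre_).

-- ===== PORT A =====
-- the 'for length in exon_lengths: cum += length; cumulative_targets.append(cum)' loop
def pvCums (exon_lengths : List Int) : List Int :=
  (exon_lengths.foldl (fun p L => (p.1 ++ [p.2 + L], p.2 + L)) (([] : List Int), (0 : Int))).1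

-- the 'for i, char in enumerate(aligned_seq, start=1)' loop; state =
-- (segments, seg_coords, raw_count, current_segment, seg_start, exon_index)
def pvALoop (targets : List Int) :
    List (Int × Char) → List String → List (Int × Int) → Int → List Char → Option Int → Nat →
    List String × List (Int × Int)
  | [], segs, coords, _, _, _, _ => (segs, coords)
  | (i, c) :: rest, segs, coords, raw, cur, ss, k =>
    let start := ss.getD i                    -- 'if seg_start is None: seg_start = i'
    let cur' := cur ++ [c]                    -- current_segment.append(char)
    let raw' := if c != '-' then raw + 1 else raw
    match targets[k]? with                    -- 'exon_index < len(ct) and raw_count == ct[exon_index]'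
    | some t =>
      if raw' = t then
        pvALoop targets rest (segs ++ [String.ofList cur']) (coords ++ [(start, i)]) raw' [] none (k + 1)
      else
        pvALoop targets rest segs coords raw' cur' (some start) k
    | none => pvALoop targets rest segs coords raw' cur' (some start) k

def partition_aligned_sequence_with_coords (aligned_seq : String) (exon_lengths : List Int) :
    List String × (List (Int × Int)) :=
  let targets := pvCums exon_lengths
  pvALoop targets (PySem.List.enumerate aligned_seq.toList 1) [] [] 0 [] none 0

-- ===== PORT B =====
-- the 'for length in exon_lengths' loop of B; state = (segments, seg_coords, t, prev_end)
def pvBLoop (s : List Char) (positions : List Int) :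
    List Int → List String → List (Int × Int) → Int → Int → List String × List (Int × Int)
  | [], segs, coords, _, _ => (segs, coords)
  | L :: rest, segs, coords, t, prevEnd =>
    let t' := t + L
    if t' > (positions.length : Int) then (segs, coords)   -- break
    else
      let e := (PySem.List.pyGet? positions (t' - 1)).getD 0   -- positions[t-1]
      pvBLoop s positions rest
        (segs ++ [String.ofList (PySem.List.slice s (some prevEnd) (some e))])
        (coords ++ [(prevEnd + 1, e)]) t' e

def partition_aligned_sequence_with_coords_alt (aligned_seq : String) (exon_lengths : List Int) :
    List String × (List (Int × Int)) :=
  let cs := aligned_seq.toList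
  -- positions = [i for i, c in enumerate(aligned_seq, start=1) if c != '-']
  let positions := ((PySem.List.enumerate cs 1).filter (fun p => p.2 != '-')).map (fun p => p.1)
  pvBLoop cs positions exon_lengths [] [] 0 0

-- ===== PRECONDITION & SPEC =====
-- number of non-gap characters (used by Pre_ and the proofs)
def ngN (l : List Char) : Nat := l.countP (fun c => c != '-')

-- Pre_ excludes the inputs on which A's scanner actually reaches a non-positive
-- exon length (i.e. the positive prefix of exon_lengths does not already exhaust
-- the non-gap characters): there A still returns, but its value (cutting a
-- zero-length exon only when the next character happens to be a gap, or silently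
-- dropping all exons after a negative length) is an accident of its scanner.
def Pre_partition_aligned_sequence_with_coords (aligned_seq : String) (exon_lengths : List Int) : Prop :=
  (∀ L ∈ exon_lengths, (1 : Int) ≤ L) ∨
    ((exon_lengths.takeWhile (fun L => decide ((1 : Int) ≤ L))).sum > (ngN aligned_seq.toList : Int))
instance (aligned_seq : String) (exon_lengths : List Int) : Decidable (Pre_partition_aligned_sequence_with_coords aligned_seq exon_lengths) := by unfold Pre_partition_aligned_sequence_with_coords; infer_instance

def pvWitness_partition_aligned_sequence_with_coords : String × List Int := ("AC-G-T", [1, 2])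

def Spec_partition_aligned_sequence_with_coords (aligned_seq : String) (exon_lengths : List Int) (out : List String × (List (Int × Int))) : Prop := out = partition_aligned_sequence_with_coords_alt aligned_seq exon_lengths
instance (aligned_seq : String) (exon_lengths : List Int) (out : List String × (List (Int × Int))) : Decidable (Spec_partition_aligned_sequence_with_coords aligned_seq exon_lengths out) := by unfold Spec_partition_aligned_sequence_with_coords; infer_instance

-- ===== CLAIM (what is proved, stated in full; the proofs are below) =====
def Claim_equal_partition_aligned_sequence_with_coords : Prop := ∀ (aligned_seq : String) (exon_lengths : List Int), Dom_partition_aligned_sequence_with_coords aligned_seq exon_lengths → Pre_partition_aligned_sequence_with_coords aligned_seq exon_lengths → Spec_partition_aligned_sequence_with_coords aligned_seq exon_lengths (partition_aligned_sequence_with_coords aligned_seq exon_lengths)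

-- ===== LEMMAS AND PROOFS =====

-- 1-based positions of the non-gap characters, starting the numbering at i
def posFrom (i : Int) : List Char → List Int
  | [] => []
  | c :: l => if c != '-' then i :: posFrom (i + 1) l else posFrom (i + 1) l

-- A's loop with the REMAINING target list instead of (full list, index)
def aLoopR :
    List Int → List (Int × Char) → List String → List (Int × Int) → Int → List Char → Option Int →
    List String × List (Int × Int)
  | _, [], segs, coords, _, _, _ => (segs, coords)
  | ts, (i, c) :: rest, segs, coords, raw, cur, ss =>
    let start := ss.getD i
    let cur' := cur ++ [c]
    let raw' := if c != '-' then raw + 1 else raw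
    match ts with
    | t :: ts' =>
      if raw' = t then
        aLoopR ts' rest (segs ++ [String.ofList cur']) (coords ++ [(start, i)]) raw' [] none
      else
        aLoopR (t :: ts') rest segs coords raw' cur' (some start)
    | [] => aLoopR [] rest segs coords raw' cur' (some start)

-- the cumulative-sums list, structurally
def cumsR (c : Int) : List Int → List Int
  | [] => []
  | L :: ls => (c + L) :: cumsR (c + L) ls

lemma pvCums_foldl (lens : List Int) : ∀ (acc : List Int) (c : Int),
    (lens.foldl (fun p L => (p.1 ++ [p.2 + L], p.2 + L)) (acc, c)).1 = acc ++ cumsR c lens := by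
  induction lens with
  | nil => intro acc c; simp [cumsR]
  | cons L ls ih => intro acc c; simp [List.foldl_cons, cumsR, ih]

lemma pvCums_eq (lens : List Int) : pvCums lens = cumsR 0 lens := by
  simpa using pvCums_foldl lens [] 0

lemma positions_eq (l : List Char) : ∀ (k : Int),
    ((PySem.List.enumerate l k).filter (fun p => p.2 != '-')).map (fun p => p.1)
      = posFrom k l := by
  induction l with
  | nil => intro k; simp [PySem.List.enumerate_nil, posFrom]
  | cons c l ih =>
    intro k
    by_cases hc : c = '-' <;>
      simp [PySem.List.enumerate_cons, hc, posFrom, ih (k + 1)]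

lemma pvALoop_eq_aLoopR (targets : List Int) (l : List (Int × Char)) :
    ∀ (segs : List String) (coords : List (Int × Int)) (raw : Int) (cur : List Char)
      (ss : Option Int) (k : Nat),
    pvALoop targets l segs coords raw cur ss k = aLoopR (targets.drop k) l segs coords raw cur ss := by
  induction l with
  | nil => intro segs coords raw cur ss k; cases targets.drop k <;> simp [pvALoop, aLoopR]
  | cons p rest ih =>
    intro segs coords raw cur ss k
    obtain ⟨i, c⟩ := p
    have hhead : targets[k]? = (targets.drop k).head? := by simp
    cases hd : targets.drop k with
    | nil =>
      have hget : targets[k]? = none := by rw [hhead, hd]; rfl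
      simp only [pvALoop, aLoopR, hget]
      rw [ih, hd]
    | cons t ts' =>
      have hget : targets[k]? = some t := by rw [hhead, hd]; rfl
      have htail : targets.drop (k + 1) = ts' := by rw [← List.tail_drop, hd]; rfl
      simp only [pvALoop, aLoopR, hget]
      split <;> split <;>
        first
        | rw [ih, htail]
        | rw [ih, hd]

lemma aLoopR_nil_targets (l : List (Int × Char)) :
    ∀ segs coords raw cur ss, aLoopR [] l segs coords raw cur ss = (segs, coords) := by
  induction l with
  | nil => intro segs coords raw cur ss; simp [aLoopR]
  | cons p rest ih => intro segs coords raw cur ss; obtain ⟨i, c⟩ := p; simp [aLoopR, ih]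

lemma neverReach (t' : Int) (ts' : List Int) (l : List Char) :
    ∀ (i0 : Int) segs coords (raw : Int) cur ss, raw + (ngN l : Int) < t' →
      aLoopR (t' :: ts') (PySem.List.enumerate l i0) segs coords raw cur ss = (segs, coords) := by
  induction l with
  | nil => intro i0 segs coords raw cur ss _; simp [PySem.List.enumerate_nil, aLoopR]
  | cons c l ih =>
    intro i0 segs coords raw cur ss h
    have hng : ngN (c :: l) = (if (c != '-') = true then 1 else 0) + ngN l := by
      by_cases hb : (c != '-') = true <;> simp [ngN, hb, Nat.add_comm]
    rw [hng] at h
    rw [PySem.List.enumerate_cons]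
    simp only [aLoopR]
    by_cases hb : (c != '-') = true
    · rw [if_pos hb] at h
      rw [if_pos hb]
      push_cast at h
      rw [if_neg (by omega : ¬ raw + 1 = t')]
      exact ih (i0 + 1) _ _ _ _ _ (by omega)
    · rw [if_neg hb] at h
      rw [if_neg hb]
      push_cast at h
      rw [if_neg (by omega : ¬ raw = t')]
      exact ih (i0 + 1) _ _ _ _ _ (by omega)

lemma posFrom_length (l : List Char) : ∀ i, (posFrom i l).length = ngN l := by
  induction l with
  | nil => intro i; simp [posFrom, ngN]
  | cons c l ih =>
    intro i
    by_cases hb : (c != '-') = true <;>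
      simp [posFrom, hb, ngN, ih (i + 1)]

lemma posFrom_mem_bounds (l : List Char) : ∀ (i x : Int), x ∈ posFrom i l → i ≤ x ∧ x < i + l.length := by
  induction l with
  | nil => intro i x hx; simp [posFrom] at hx
  | cons c l ih =>
    intro i x hx
    by_cases hb : (c != '-') = true
    · rw [posFrom, if_pos hb] at hx
      rcases List.mem_cons.mp hx with h | h
      · subst h
        simp only [List.length_cons]
        push_cast
        omega
      · have := ih (i + 1) x h
        simp only [List.length_cons]
        push_cast
        omega
    · rw [posFrom, if_neg hb] at hx
      have := ih (i + 1) x hx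
      simp only [List.length_cons]
      push_cast
      omega

lemma posFrom_get_ng (l : List Char) : ∀ (i : Int) (m : Nat) (e : Int),
    (posFrom i l)[m]? = some e → ngN (l.take (e - i + 1).toNat) = m + 1 := by
  induction l with
  | nil => intro i m e h; simp [posFrom] at h
  | cons c l ih =>
    intro i m e h
    by_cases hb : (c != '-') = true
    · rw [posFrom, if_pos hb] at h
      cases m with
      | zero =>
        simp at h
        have hn : (e - i + 1).toNat = 1 := by omega
        simp [hn, ngN, hb]
      | succ m' =>
        rw [List.getElem?_cons_succ] at h
        have hbd := posFrom_mem_bounds l (i + 1) e (List.mem_of_getElem? h)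
        have hih := ih (i + 1) m' e h
        have hn : (e - i + 1).toNat = (e - (i + 1) + 1).toNat + 1 := by omega
        rw [hn, List.take_succ_cons]
        simp only [ngN, List.countP_cons, hb, if_true]
        simp only [ngN] at hih
        omega
    · rw [posFrom, if_neg hb] at h
      have hbd := posFrom_mem_bounds l (i + 1) e (List.mem_of_getElem? h)
      have hih := ih (i + 1) m e h
      have hn : (e - i + 1).toNat = (e - (i + 1) + 1).toNat + 1 := by omega
      rw [hn, List.take_succ_cons]
      simp only [ngN, List.countP_cons, hb]
      simpa [ngN] using hih

lemma posFrom_append (u v : List Char) : ∀ i,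
    posFrom i (u ++ v) = posFrom i u ++ posFrom (i + u.length) v := by
  induction u with
  | nil => intro i; simp [posFrom]
  | cons c u ih =>
    intro i
    have harith : i + 1 + (u.length : Int) = i + ((u.length : Int) + 1) := by ring
    by_cases hb : (c != '-') = true <;>
      simp [posFrom, hb, ih (i + 1), List.length_cons, harith]

-- the inner scan: A consumes characters up to the position of the next target's
-- last non-gap character, then fires
lemma scan (t' : Int) (ts' : List Int) (l : List Char) :
    ∀ (i0 raw e : Int) segs coords cur (ss : Option Int),
    (posFrom i0 l)[(t' - raw - 1).toNat]? = some e → raw < t' →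
    aLoopR (t' :: ts') (PySem.List.enumerate l i0) segs coords raw cur ss
      = aLoopR ts' (PySem.List.enumerate (l.drop (e - i0 + 1).toNat) (e + 1))
          (segs ++ [String.ofList (cur ++ l.take (e - i0 + 1).toNat)])
          (coords ++ [(ss.getD i0, e)]) t' [] none := by
  induction l with
  | nil => intro i0 raw e segs coords cur ss h _; simp [posFrom] at h
  | cons c l ih =>
    intro i0 raw e segs coords cur ss h hlt
    rw [PySem.List.enumerate_cons]
    simp only [aLoopR]
    by_cases hb : (c != '-') = true
    · rw [posFrom, if_pos hb] at h
      by_cases hf : raw + 1 = t'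
      · have h0 : (t' - raw - 1).toNat = 0 := by omega
        rw [h0] at h
        have he : e = i0 := by simpa using h.symm
        subst he
        rw [if_pos hb, if_pos hf]
        have hn : (e - e + 1).toNat = 1 := by omega
        rw [hn]
        simp [hf]
      · have hn1 : (t' - raw - 1).toNat = (t' - (raw + 1) - 1).toNat + 1 := by omega
        rw [hn1, List.getElem?_cons_succ] at h
        have hbd := posFrom_mem_bounds l (i0 + 1) e (List.mem_of_getElem? h)
        rw [if_pos hb, if_neg hf]
        have hn : (e - i0 + 1).toNat = (e - (i0 + 1) + 1).toNat + 1 := by omega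
        rw [hn, List.take_succ_cons, List.drop_succ_cons]
        have hcat : cur ++ c :: l.take (e - (i0 + 1) + 1).toNat
            = (cur ++ [c]) ++ l.take (e - (i0 + 1) + 1).toNat := by simp
        rw [hcat]
        exact ih (i0 + 1) (raw + 1) e segs coords (cur ++ [c]) (some (ss.getD i0)) h (by omega)
    · rw [posFrom, if_neg hb] at h
      have hbd := posFrom_mem_bounds l (i0 + 1) e (List.mem_of_getElem? h)
      rw [if_neg hb, if_neg (show ¬ raw = t' by omega)]
      have hn : (e - i0 + 1).toNat = (e - (i0 + 1) + 1).toNat + 1 := by omega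
      rw [hn, List.take_succ_cons, List.drop_succ_cons]
      have hcat : cur ++ c :: l.take (e - (i0 + 1) + 1).toNat
          = (cur ++ [c]) ++ l.take (e - (i0 + 1) + 1).toNat := by simp
      rw [hcat]
      exact ih (i0 + 1) raw e segs coords (cur ++ [c]) (some (ss.getD i0)) h hlt

-- the main loop correspondence; the hypothesis says the loop never reaches a
-- non-positive length: either all lengths are positive, or the positive prefix's
-- cumulative target already exceeds the available non-gap characters
lemma mainLemma (cs : List Char) (lens : List Int) :
    ∀ (j : Nat) (t : Int) segs coords,
    ((∀ L ∈ lens, (1 : Int) ≤ L) ∨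
      t + ((lens.takeWhile (fun L => decide ((1 : Int) ≤ L))).sum) > (ngN cs : Int)) →
    j ≤ cs.length → (ngN (cs.take j) : Int) = t →
    aLoopR (cumsR t lens) (PySem.List.enumerate (cs.drop j) ((j : Int) + 1)) segs coords t [] none
      = pvBLoop cs (posFrom 1 cs) lens segs coords t (j : Int) := by
  induction lens with
  | nil =>
    intro j t segs coords _ hj ht
    simp [cumsR, aLoopR_nil_targets, pvBLoop]
  | cons L lens' ih =>
    intro j t segs coords hpos hj ht
    have ht0 : 0 ≤ t := by rw [← ht]; positivity
    have hsplit : cs.take j ++ cs.drop j = cs := List.take_append_drop j cs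
    have hng2 : ngN cs = ngN (cs.take j) + ngN (cs.drop j) := by
      have h2 := List.countP_append (p := fun c => c != '-') (l₁ := cs.take j) (l₂ := cs.drop j)
      rw [hsplit] at h2
      simpa [ngN] using h2
    have hnglen : (ngN cs : Int) = t + (ngN (cs.drop j) : Int) := by omega
    have htle : t ≤ (ngN cs : Int) := by omega
    have hL : (1 : Int) ≤ L := by
      rcases hpos with hall | hsum
      · exact hall L (List.mem_cons_self ..)
      · by_contra hneg
        rw [List.takeWhile_cons_of_neg (by simpa using hneg)] at hsum
        simp at hsum
        omega
    rw [cumsR]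
    simp only [pvBLoop]
    have hplen : ((posFrom 1 cs).length : Int) = (ngN cs : Int) := by
      rw [posFrom_length]
    by_cases hN : t + L > ((posFrom 1 cs).length : Int)
    · -- target beyond the available non-gap characters: both stop
      rw [if_pos hN]
      exact neverReach (t + L) _ _ _ _ _ _ _ _ (by omega)
    · rw [if_neg hN]
      -- the end coordinate: positions[t + L - 1]
      have hlen2 : ((t + L - 1).toNat) < (posFrom 1 cs).length := by omega
      set e := (posFrom 1 cs)[(t + L - 1).toNat] with hedef
      have hget : (posFrom 1 cs)[(t + L - 1).toNat]? = some e :=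
        List.getElem?_eq_getElem hlen2
      have hpy : PySem.List.pyGet? (posFrom 1 cs) (t + L - 1) = some e := by
        rw [PySem.List.pyGet?_of_nonneg (posFrom 1 cs) (show (0:Int) ≤ t + L - 1 by omega), hget]
      have hbd : 1 ≤ e ∧ e < 1 + (cs.length : Int) :=
        posFrom_mem_bounds cs 1 e (List.mem_of_getElem? hget)
      -- split the positions index at j
      have htlen : (cs.take j).length = j := by simp [hj]
      have hsplitpos : posFrom 1 cs = posFrom 1 (cs.take j) ++ posFrom (1 + j) (cs.drop j) := by
        conv_lhs => rw [← hsplit]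
        rw [posFrom_append, htlen]
      have hplenj : (posFrom 1 (cs.take j)).length = t.toNat := by
        rw [posFrom_length]; omega
      have hsuf : (posFrom ((j : Int) + 1) (cs.drop j))[(t + L - t - 1).toNat]? = some e := by
        rw [hsplitpos] at hget
        rw [List.getElem?_append_right (by omega)] at hget
        rw [show (1 + (j : Int)) = ((j : Int) + 1) by ring] at hget
        rw [show ((t + L - 1).toNat - (posFrom 1 (cs.take j)).length) = (t + L - t - 1).toNat by omega] at hget
        exact hget
      have hbd2 : (j : Int) + 1 ≤ e ∧ e < (j : Int) + 1 + (cs.drop j).length :=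
        posFrom_mem_bounds _ _ e (List.mem_of_getElem? hsuf)
      -- the number of non-gap characters up to e is exactly t + L
      have hng_e : (ngN (cs.take e.toNat) : Int) = t + L := by
        have := posFrom_get_ng cs 1 ((t + L - 1).toNat) e hget
        rw [show (e - 1 + 1).toNat = e.toNat by omega] at this
        omega
      -- run the scanner up to e
      rw [scan (t + L) (cumsR (t + L) lens') (cs.drop j) ((j : Int) + 1) t e segs coords [] none hsuf (by omega)]
      rw [List.drop_drop]
      rw [show (j + (e - ((j : Int) + 1) + 1).toNat) = e.toNat by omega]
      rw [show (e + 1) = ((e.toNat : Int) + 1) by omega]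
      rw [ih e.toNat (t + L) _ _ (by
        rcases hpos with hall | hsum
        · exact Or.inl (fun L' hL' => hall L' (List.mem_cons_of_mem _ hL'))
        · refine Or.inr ?_
          rw [List.takeWhile_cons_of_pos (by simpa using hL)] at hsum
          rw [List.sum_cons] at hsum
          omega) (by omega) hng_e]
      rw [hpy]
      simp only [Option.getD_some, Option.getD_none]
      rw [show ((e.toNat : Int)) = e by omega]
      have hseg : PySem.List.slice cs (some (j : Int)) (some e)
          = (cs.drop j).take ((e - ((j : Int) + 1) + 1).toNat) := by
        rw [PySem.List.slice_toNat _ (by omega) (by omega)]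
        congr 1
        omega
      rw [hseg]
      rfl

-- ===== VERDICT (by name: the statement is the Claim_ definition above) =====
theorem partition_aligned_sequence_with_coords_spec : Claim_equal_partition_aligned_sequence_with_coords := by
  intro s lens _ hpre
  unfold Spec_partition_aligned_sequence_with_coords
  show pvALoop (pvCums lens) (PySem.List.enumerate s.toList 1) [] [] 0 [] none 0
      = pvBLoop s.toList
        (((PySem.List.enumerate s.toList 1).filter (fun p => p.2 != '-')).map (fun p => p.1))
        lens [] [] 0 0
  rw [pvALoop_eq_aLoopR, List.drop_zero, pvCums_eq, positions_eq]
  have hpre' : (∀ L ∈ lens, (1 : Int) ≤ L) ∨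
      (0 : Int) + ((lens.takeWhile (fun L => decide ((1 : Int) ≤ L))).sum) > (ngN s.toList : Int) := by
    unfold Pre_partition_aligned_sequence_with_coords at hpre
    rcases hpre with h | h
    · exact Or.inl h
    · exact Or.inr (by omega)
  have hmain := mainLemma s.toList lens 0 0 [] [] hpre' (by omega) (by simp [ngN])
  norm_num at hmain
  exact hmain
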